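-- pv_equiv track=rewrite | github.com/JungyuOO/OCPOps-PlaybookStudio | src/play_book_studio/app/ops_console_api.py | _manifest_yaml_for_apply
-- ===== SOURCE A (Python) =====
-- def _strip_yaml_block(lines: list[str], start_index: int, parent_indent: int) -> int:
--     index = start_index + 1
--     while index < len(lines):
--         line = lines[index]
--         if line.strip() and (len(line) - len(line.lstrip(" "))) <= parent_indent:
--             break
--         index += 1
--     return index
--
-- def _manifest_yaml_for_apply(manifest_yaml: str) -> str:
--     server_metadata_keys = {
--         "creationTimestamp",
--         "deletionGracePeriodSeconds",
--         "deletionTimestamp",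
--         "generation",
--         "managedFields",
--         "resourceVersion",
--         "selfLink",
--         "uid",
--     }
--     lines = str(manifest_yaml or "").splitlines()
--     cleaned: list[str] = []
--     index = 0
--     in_metadata = False
--     while index < len(lines):
--         line = lines[index]
--         stripped = line.strip()
--         indent = len(line) - len(line.lstrip(" "))
--         if indent == 0:
--             in_metadata = stripped == "metadata:"
--             if stripped == "status:":
--                 index = _strip_yaml_block(lines, index, indent)
--                 continue
--         if in_metadata and indent == 2 and ":" in stripped:
--             key = stripped.split(":", 1)[0]
--             if key in server_metadata_keys:
--                 index = _strip_yaml_block(lines, index, indent) if stripped.endswith(":") else index + 1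
--                 continue
--         cleaned.append(line)
--         index += 1
--     return "\n".join(cleaned).strip() + "\n"
-- ===== SOURCE B (Python) =====
-- def _manifest_yaml_for_apply(manifest_yaml: str) -> str:
--     server_metadata_keys = {
--         "creationTimestamp",
--         "deletionGracePeriodSeconds",
--         "deletionTimestamp",
--         "generation",
--         "managedFields",
--         "resourceVersion",
--         "selfLink",
--         "uid",
--     }
--     cleaned: list[str] = []
--     in_metadata = False
--     skip_indent = None  # while not None: drop blank lines and lines indented deeper
--     for line in str(manifest_yaml or "").splitlines():
--         stripped = line.strip()
--         indent = len(line) - len(line.lstrip(" "))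
--         if skip_indent is not None:
--             if not stripped or indent > skip_indent:
--                 continue
--             skip_indent = None
--         if indent == 0:
--             in_metadata = stripped == "metadata:"
--             if stripped == "status:":
--                 skip_indent = 0
--                 continue
--         if in_metadata and indent == 2 and ":" in stripped:
--             if stripped.split(":", 1)[0] in server_metadata_keys:
--                 if stripped.endswith(":"):
--                     skip_indent = 2
--                 continue
--         cleaned.append(line)
--     return "\n".join(cleaned).strip() + "\n"
-- ===== Notes on version B (the rewrite author's own statement) =====
-- stated objective: simpler
-- what changed: Replaced the index-advancing _strip_yaml_block helper (with its re-scanning while-loop and index jumps) by one linear for-loop over the lines carrying a skip_indent state variable that drops blank/deeper lines while a block is being skipped.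
import Mathlib
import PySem

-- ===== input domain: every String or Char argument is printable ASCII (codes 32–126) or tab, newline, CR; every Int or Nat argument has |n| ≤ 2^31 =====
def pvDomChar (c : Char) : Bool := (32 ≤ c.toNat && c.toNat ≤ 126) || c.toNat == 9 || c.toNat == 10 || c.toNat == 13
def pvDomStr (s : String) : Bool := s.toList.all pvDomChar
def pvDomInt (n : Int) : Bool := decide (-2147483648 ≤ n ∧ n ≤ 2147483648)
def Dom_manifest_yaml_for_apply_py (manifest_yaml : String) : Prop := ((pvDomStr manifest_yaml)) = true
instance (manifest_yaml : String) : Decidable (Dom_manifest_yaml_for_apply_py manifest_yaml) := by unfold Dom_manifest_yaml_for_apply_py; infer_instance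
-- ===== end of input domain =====

-- B replaces A's index-jumping _strip_yaml_block helper by a single linear pass with a
-- skip-indent state variable (objective: simpler decomposition; same O(n) cost).

-- ===== PORT A =====

-- hand port of `len(line) - len(line.lstrip(" "))`: exact, it is the number of leading spaces
def pvIndent (line : List Char) : Nat := (line.takeWhile (fun c => c == ' ')).length

def pvServerKeys : PySem.Set (List Char) :=
  PySem.Set.ofList
    [ "creationTimestamp".toList, "deletionGracePeriodSeconds".toList,
      "deletionTimestamp".toList, "generation".toList, "managedFields".toList,
      "resourceVersion".toList, "selfLink".toList, "uid".toList ]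

-- the `while` body of _strip_yaml_block, starting at `index`
def pvStripGo (lines : List (List Char)) (index : Nat) (parent_indent : Nat) : Nat :=
  if h : index < lines.length then
    let line := lines[index]
    if PySem.Chars.strip line ≠ [] ∧ pvIndent line ≤ parent_indent then index
    else pvStripGo lines (index + 1) parent_indent
  else index
termination_by lines.length - index
decreasing_by exact Nat.sub_succ_lt_self _ _ h

def strip_yaml_block (lines : List (List Char)) (start_index : Nat) (parent_indent : Nat) : Nat :=
  pvStripGo lines (start_index + 1) parent_indent

theorem pvStripGo_ge (lines : List (List Char)) (index : Nat) (p : Nat) :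
    index ≤ pvStripGo lines index p := by
  fun_induction pvStripGo lines index p with
  | case1 => exact le_refl _
  | case2 index h line hbrk ih => exact le_trans (Nat.le_succ index) ih
  | case3 => exact le_refl _

theorem pvStripGo_le (lines : List (List Char)) (index : Nat) (p : Nat)
    (h : index ≤ lines.length) : pvStripGo lines index p ≤ lines.length := by
  fun_induction pvStripGo lines index p with
  | case1 _ h' => exact le_of_lt h'
  | case2 index h' line hbrk ih => exact ih (by omega)
  | case3 => exact h

theorem pvStripDec (lines : List (List Char)) (index p : Nat) (h : index < lines.length) :
    lines.length - strip_yaml_block lines index p < lines.length - index := by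
  have h1 := pvStripGo_ge lines (index + 1) p
  have h2 := pvStripGo_le lines (index + 1) p (by omega)
  unfold strip_yaml_block
  omega

-- the main `while` loop of _manifest_yaml_for_apply
def pvLoopA (lines : List (List Char)) (cleaned : List (List Char)) (index : Nat)
    (in_metadata : Bool) : List (List Char) :=
  if h : index < lines.length then
    let line := lines[index]
    let stripped := PySem.Chars.strip line
    let indent := pvIndent line
    let inm2 : Bool := if indent = 0 then stripped == "metadata:".toList else in_metadata
    if indent = 0 ∧ stripped = "status:".toList then
      pvLoopA lines cleaned (strip_yaml_block lines index indent) inm2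
    else if inm2 = true ∧ indent = 2 ∧ PySem.Chars.isIn [':'] stripped = true ∧
        (PySem.Chars.splitOnMax stripped [':'] 1).headD [] ∈ pvServerKeys then
      if PySem.Chars.endswith stripped [':'] then
        pvLoopA lines cleaned (strip_yaml_block lines index indent) inm2
      else
        pvLoopA lines cleaned (index + 1) inm2
    else
      pvLoopA lines (cleaned ++ [line]) (index + 1) inm2
  else cleaned
termination_by lines.length - index
decreasing_by
  · exact pvStripDec lines index (pvIndent lines[index]) h
  · exact pvStripDec lines index (pvIndent lines[index]) h
  · exact Nat.sub_succ_lt_self _ _ h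
  · exact Nat.sub_succ_lt_self _ _ h

def manifest_yaml_for_apply_py (manifest_yaml : String) : String :=
  String.ofList (PySem.Chars.strip (PySem.Chars.join "\n".toList
    (pvLoopA (PySem.Chars.splitlines manifest_yaml.toList) [] 0 false)) ++ "\n".toList)

-- ===== PORT B =====

-- one linear pass; `skip` = the pending skip indent (none = not skipping)
def pvLoopB (todo : List (List Char)) (in_metadata : Bool) (skip : Option Nat)
    (cleaned : List (List Char)) : List (List Char) :=
  match todo with
  | [] => cleaned
  | line :: rest =>
    let stripped := PySem.Chars.strip line
    let indent := pvIndent line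
    let skipping : Bool := match skip with
      | some si => stripped == [] || decide (si < indent)
      | none => false
    if skipping then pvLoopB rest in_metadata skip cleaned
    else
      let inm2 : Bool := if indent = 0 then stripped == "metadata:".toList else in_metadata
      if indent = 0 ∧ stripped = "status:".toList then
        pvLoopB rest inm2 (some 0) cleaned
      else if inm2 = true ∧ indent = 2 ∧ PySem.Chars.isIn [':'] stripped = true ∧
          (PySem.Chars.splitOnMax stripped [':'] 1).headD [] ∈ pvServerKeys then
        if PySem.Chars.endswith stripped [':'] then
          pvLoopB rest inm2 (some 2) cleaned
        else
          pvLoopB rest inm2 none cleaned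
      else
        pvLoopB rest inm2 none (cleaned ++ [line])

def manifest_yaml_for_apply_py_alt (manifest_yaml : String) : String :=
  String.ofList (PySem.Chars.strip (PySem.Chars.join "\n".toList
    (pvLoopB (PySem.Chars.splitlines manifest_yaml.toList) false none [])) ++ "\n".toList)

-- ===== PRECONDITION & SPEC =====
def Spec_manifest_yaml_for_apply_py (manifest_yaml : String) (out : String) : Prop := out = manifest_yaml_for_apply_py_alt manifest_yaml
instance (manifest_yaml : String) (out : String) : Decidable (Spec_manifest_yaml_for_apply_py manifest_yaml out) := by unfold Spec_manifest_yaml_for_apply_py; infer_instance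

-- ===== CLAIM (what is proved, stated in full; the proofs are below) =====
def Claim_equal_manifest_yaml_for_apply_py : Prop := ∀ (manifest_yaml : String), Dom_manifest_yaml_for_apply_py manifest_yaml → Spec_manifest_yaml_for_apply_py manifest_yaml (manifest_yaml_for_apply_py manifest_yaml)

-- ===== LEMMAS AND PROOFS =====

-- the shared per-line body of pvLoopB once skipping is settled off
def pvBody (line : List Char) (rest : List (List Char)) (inm : Bool)
    (cleaned : List (List Char)) : List (List Char) :=
  let stripped := PySem.Chars.strip line
  let indent := pvIndent line
  let inm2 : Bool := if indent = 0 then stripped == "metadata:".toList else inm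
  if indent = 0 ∧ stripped = "status:".toList then
    pvLoopB rest inm2 (some 0) cleaned
  else if inm2 = true ∧ indent = 2 ∧ PySem.Chars.isIn [':'] stripped = true ∧
      (PySem.Chars.splitOnMax stripped [':'] 1).headD [] ∈ pvServerKeys then
    if PySem.Chars.endswith stripped [':'] then
      pvLoopB rest inm2 (some 2) cleaned
    else
      pvLoopB rest inm2 none cleaned
  else
    pvLoopB rest inm2 none (cleaned ++ [line])

theorem pvLoopB_cons_none (line : List Char) (rest : List (List Char)) (inm : Bool)
    (cleaned : List (List Char)) :
    pvLoopB (line :: rest) inm none cleaned = pvBody line rest inm cleaned := rfl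

theorem pvLoopB_cons_some_off (line : List Char) (rest : List (List Char)) (inm : Bool)
    (si : Nat) (cleaned : List (List Char))
    (h1 : PySem.Chars.strip line ≠ []) (h2 : pvIndent line ≤ si) :
    pvLoopB (line :: rest) inm (some si) cleaned = pvBody line rest inm cleaned := by
  have hflag : (PySem.Chars.strip line == ([] : List Char) || decide (si < pvIndent line)) = false := by
    simp [h1, Nat.not_lt.mpr h2]
  simp only [pvLoopB, hflag]
  rfl

theorem pvLoopB_cons_some_on (line : List Char) (rest : List (List Char)) (inm : Bool)
    (si : Nat) (cleaned : List (List Char))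
    (h : PySem.Chars.strip line = [] ∨ si < pvIndent line) :
    pvLoopB (line :: rest) inm (some si) cleaned = pvLoopB rest inm (some si) cleaned := by
  have hflag : (PySem.Chars.strip line == ([] : List Char) || decide (si < pvIndent line)) = true := by
    rcases h with h | h
    · simp [h]
    · simp [h]
  simp only [pvLoopB, hflag]
  rfl

-- B in skip mode from position i lands exactly where A's _strip_yaml_block scan stops
theorem pvLoopB_skip (lines : List (List Char)) (i : Nat) (si : Nat) (inm : Bool)
    (cleaned : List (List Char)) :
    pvLoopB (lines.drop i) inm (some si) cleaned =
      pvLoopB (lines.drop (pvStripGo lines i si)) inm none cleaned := by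
  fun_induction pvStripGo lines i si with
  | case1 i h line hbrk =>
    rw [List.drop_eq_getElem_cons h, pvLoopB_cons_some_off _ _ _ _ _ hbrk.1 hbrk.2,
      pvLoopB_cons_none]
  | case2 i h line hbrk ih =>
    rw [List.drop_eq_getElem_cons h, pvLoopB_cons_some_on]
    · exact ih
    · by_cases hb : PySem.Chars.strip lines[i] = []
      · exact Or.inl hb
      · exact Or.inr (Nat.lt_of_not_le (fun hle => hbrk ⟨hb, hle⟩))
  | case3 i h =>
    rw [List.drop_eq_nil_of_le (show lines.length ≤ i by omega)]
    rfl

-- A's index loop equals B's structural loop on the remaining suffix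
theorem pvLoopA_eq_pvLoopB (lines : List (List Char)) (i : Nat) (inm : Bool)
    (cleaned : List (List Char)) :
    pvLoopA lines cleaned i inm = pvLoopB (lines.drop i) inm none cleaned := by
  fun_induction pvLoopA lines cleaned i inm with
  | case1 cleaned i inm h line stripped indent inm2 hcond ih =>
    rw [List.drop_eq_getElem_cons h, pvLoopB_cons_none]
    unfold pvBody
    have hcond' : (pvIndent lines[i] = 0 ∧ PySem.Chars.strip lines[i] = "status:".toList) := hcond
    rw [if_pos hcond', ih, strip_yaml_block, show indent = 0 from hcond.1, ← pvLoopB_skip]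
    have einm : inm2 = (if pvIndent lines[i] = 0 then PySem.Chars.strip lines[i] == "metadata:".toList else inm) := rfl
    rw [einm, hcond'.1]
  | case2 cleaned i inm h line stripped indent inm2 hc1 hc2 hend ih =>
    rw [List.drop_eq_getElem_cons h, pvLoopB_cons_none]
    unfold pvBody
    have hc1' : ¬(pvIndent lines[i] = 0 ∧ PySem.Chars.strip lines[i] = "status:".toList) := hc1
    have hc2' : ((if pvIndent lines[i] = 0 then PySem.Chars.strip lines[i] == "metadata:".toList else inm) = true ∧ pvIndent lines[i] = 2 ∧ PySem.Chars.isIn [':'] (PySem.Chars.strip lines[i]) = true ∧ (PySem.Chars.splitOnMax (PySem.Chars.strip lines[i]) [':'] 1).headD [] ∈ pvServerKeys) := hc2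
    have hend' : PySem.Chars.endswith (PySem.Chars.strip lines[i]) [':'] = true := hend
    rw [if_neg hc1', if_pos hc2', if_pos hend', ih, strip_yaml_block,
      show indent = 2 from hc2.2.1, ← pvLoopB_skip]
    have einm : inm2 = (if pvIndent lines[i] = 0 then PySem.Chars.strip lines[i] == "metadata:".toList else inm) := rfl
    rw [einm]
  | case3 cleaned i inm h line stripped indent inm2 hc1 hc2 hend ih =>
    rw [List.drop_eq_getElem_cons h, pvLoopB_cons_none]
    unfold pvBody
    have hc1' : ¬(pvIndent lines[i] = 0 ∧ PySem.Chars.strip lines[i] = "status:".toList) := hc1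
    have hc2' : ((if pvIndent lines[i] = 0 then PySem.Chars.strip lines[i] == "metadata:".toList else inm) = true ∧ pvIndent lines[i] = 2 ∧ PySem.Chars.isIn [':'] (PySem.Chars.strip lines[i]) = true ∧ (PySem.Chars.splitOnMax (PySem.Chars.strip lines[i]) [':'] 1).headD [] ∈ pvServerKeys) := hc2
    have hend' : ¬ PySem.Chars.endswith (PySem.Chars.strip lines[i]) [':'] = true := hend
    rw [if_neg hc1', if_pos hc2', if_neg hend']
    exact ih
  | case4 cleaned i inm h line stripped indent inm2 hc1 hc2 ih =>
    rw [List.drop_eq_getElem_cons h, pvLoopB_cons_none]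
    unfold pvBody
    have hc1' : ¬(pvIndent lines[i] = 0 ∧ PySem.Chars.strip lines[i] = "status:".toList) := hc1
    have hc2' : ¬ ((if pvIndent lines[i] = 0 then PySem.Chars.strip lines[i] == "metadata:".toList else inm) = true ∧ pvIndent lines[i] = 2 ∧ PySem.Chars.isIn [':'] (PySem.Chars.strip lines[i]) = true ∧ (PySem.Chars.splitOnMax (PySem.Chars.strip lines[i]) [':'] 1).headD [] ∈ pvServerKeys) := hc2
    rw [if_neg hc1', if_neg hc2']
    exact ih
  | case5 cleaned i inm h =>
    rw [List.drop_eq_nil_of_le (by omega)]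
    rfl

-- ===== VERDICT (by name: the statement is the Claim_ definition above) =====
theorem manifest_yaml_for_apply_py_spec : Claim_equal_manifest_yaml_for_apply_py := by
  intro s _
  unfold Spec_manifest_yaml_for_apply_py manifest_yaml_for_apply_py manifest_yaml_for_apply_py_alt
  rw [pvLoopA_eq_pvLoopB, List.drop_zero]
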